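-- pv_equiv track=rewrite | github.com/Sonnnya/1306Kravchenko-lab01 | 1306Kravchenko-inf-lab.py | dec_to_fib
-- ===== SOURCE A (Python) =====
-- def fib(n):
--     if n in (1, 2):
--         return 1
--     return fib(n - 1) + fib(n - 2)
--
-- def dec_to_fib(n):
--     if n == 1:
--         return '1'
--     x = 0
--     i = 0
--     j = 0
--     s = 0
--     while True:
--         i += 1
--         if fib(i) > n:
--             break
--     a = [fib(j) for j in range(2, i)]
--
--     i -= 1
--     while s != n:
--         i -= 1
--         if s + a[i-1] <= n:
--             s += a[i-1]
--             x += 10**(i-1)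
--     return str(x)
-- ===== SOURCE B (Python) =====
-- def dec_to_fib(n):
--     fibs = [1]
--     a, b = 1, 2
--     while b <= n:
--         fibs.append(b)
--         a, b = b, a + b
--     x = 0
--     rem = n
--     for f in reversed(fibs):
--         if f <= rem:
--             rem -= f
--             x = x * 10 + 1
--         else:
--             x = x * 10
--     return str(x)
-- ===== Notes on version B (the rewrite author's own statement) =====
-- stated objective: faster
-- what changed: B builds the Fibonacci numbers once with an iterative two-variable loop instead of A's exponential-time recursive fib (re-evaluated inside both of A's loops), and accumulates the 0/1 digit value by Horner's rule over the reversed list instead of A's index arithmetic with 10**(i-1) powers.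
import Mathlib
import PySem

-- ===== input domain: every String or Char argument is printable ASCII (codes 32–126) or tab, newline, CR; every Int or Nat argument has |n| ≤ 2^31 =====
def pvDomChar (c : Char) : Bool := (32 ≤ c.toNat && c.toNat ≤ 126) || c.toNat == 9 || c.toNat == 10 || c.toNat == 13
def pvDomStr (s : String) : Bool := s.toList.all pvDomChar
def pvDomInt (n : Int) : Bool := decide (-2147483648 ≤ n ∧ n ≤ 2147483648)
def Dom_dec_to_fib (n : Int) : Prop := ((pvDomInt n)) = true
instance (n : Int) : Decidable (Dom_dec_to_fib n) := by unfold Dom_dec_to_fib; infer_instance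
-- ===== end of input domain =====

-- B replaces A's exponential recursive fib (recomputed inside both loops) by one iterative
-- Fibonacci list built once, and accumulates the digit string value by Horner's rule.

-- ===== PORT A =====
-- Python fib(n): recursive; diverges for n ≤ 0, so dec_to_fib never calls it there
-- (we give index 0 the junk value 0, which is unreachable in dec_to_fib's calls).
def fibA : Nat → Int
  | 0 => 0
  | 1 => 1
  | 2 => 1
  | (k+3) => fibA (k+2) + fibA (k+1)

-- positivity and growth facts needed only for termination of the loops below
theorem fibA_pos (i : Nat) : 1 ≤ fibA (i + 1) := by
  induction i using Nat.strong_induction_on with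
  | _ i ih =>
    match i with
    | 0 => simp [fibA]
    | 1 => simp [fibA]
    | (k+2) =>
      have h1 : 1 ≤ fibA (k+2) := ih (k+1) (by omega)
      have h2 : 1 ≤ fibA (k+1) := ih k (by omega)
      simp only [fibA]
      omega

theorem fibA_ge (i : Nat) : (i : Int) - 2 ≤ fibA i := by
  induction i using Nat.strong_induction_on with
  | _ i ih =>
    match i with
    | 0 => simp [fibA]
    | 1 => simp [fibA]
    | 2 => simp [fibA]
    | (k+3) =>
      have h1 : ((k:Int)+2) - 2 ≤ fibA (k+2) := ih (k+2) (by omega)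
      have h2 : 1 ≤ fibA (k+1) := fibA_pos k
      simp only [fibA]
      push_cast
      omega

-- first while loop: i += 1 until fib(i) > n
def loop1 (n : Int) (i : Nat) : Nat :=
  if h : fibA i > n then i else loop1 n (i+1)
termination_by (n + 3 - i).toNat
decreasing_by
  have := fibA_ge i
  omega

-- second while loop: while s != n: i -= 1; test a[i-1] (pyGet?; none = IndexError).
-- In Python the exponent i-1 is never negative on any executed path (for n < 0 the
-- branch is never taken, for n ≥ 0 the loop ends before wraparound), so .toNat is exact.
def loop2 (n : Int) (a : List Int) (s x i : Int) : Option Int :=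
  if s = n then some x
  else
    match h : PySem.List.pyGet? a (i - 1 - 1) with
    | none => none
    | some v =>
      if s + v ≤ n then loop2 n a (s + v) (x + 10 ^ ((i - 1 - 1).toNat)) (i - 1)
      else loop2 n a s x (i - 1)
termination_by (i + a.length).toNat
decreasing_by
  all_goals
    have hr : ¬ (PySem.List.pyGet? a (i - 1 - 1) = none) := by simp [h]
    rw [PySem.List.pyGet?_eq_none_iff] at hr
    have hir : PySem.Raise.InRange a.length (i - 1 - 1) := by tauto
    simp [PySem.Raise.InRange] at hir
    omega

def dec_to_fib (n : Int) : String :=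
  if n = 1 then "1"
  else
    let i0 := loop1 n 1
    let a := (PySem.List.pyRange 2 (i0 : Int) 1).map (fun j => fibA j.toNat)
    match loop2 n a 0 0 ((i0 : Int) - 1) with
    | some x => PySem.Int.toStr x
    | none => ""  -- IndexError (reached exactly when n < 0); excluded by Pre_

-- ===== PORT B =====
-- while b <= n: fibs.append(b); a, b = b, a + b      (ha is only a totality device)
def buildFibs (n : Int) (a b : Int) (ha : 1 ≤ a ∧ a < b) (acc : List Int) : List Int :=
  if hb : b ≤ n then buildFibs n b (a + b) (by omega) (acc ++ [b]) else acc
termination_by (n + 1 - b).toNat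
decreasing_by omega

-- for f in reversed(fibs): if f <= rem: rem -= f; x = x*10+1 else: x = x*10
def gxLoop (r x : Int) : List Int → Int
  | [] => x
  | f :: t => if f ≤ r then gxLoop (r - f) (x * 10 + 1) t else gxLoop r (x * 10) t

def dec_to_fib_alt (n : Int) : String :=
  let fibs := buildFibs n 1 2 (by omega) [1]
  PySem.Int.toStr (gxLoop n 0 fibs.reverse)

-- ===== PRECONDITION & SPEC =====
-- Pre_ excludes exactly n < 0, where A raises IndexError (negative-index wraparound
-- runs off the front of the list a).
def Pre_dec_to_fib (n : Int) : Prop := 0 ≤ n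
instance (n : Int) : Decidable (Pre_dec_to_fib n) := by unfold Pre_dec_to_fib; infer_instance
def pvWitness_dec_to_fib : Int := (10)

def Spec_dec_to_fib (n : Int) (out : String) : Prop := out = dec_to_fib_alt n
instance (n : Int) (out : String) : Decidable (Spec_dec_to_fib n out) := by unfold Spec_dec_to_fib; infer_instance

-- ===== CLAIM (what is proved, stated in full; the proofs are below) =====
def Claim_equal_dec_to_fib : Prop := ∀ (n : Int), Dom_dec_to_fib n → Pre_dec_to_fib n → Spec_dec_to_fib n (dec_to_fib n)

-- ===== LEMMAS AND PROOFS =====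

-- the canonical Fibonacci list [fibA k, fibA (k+1), ..., fibA (k+m-1)]
def cfibsFrom (k m : Nat) : List Int := (List.range m).map (fun t => fibA (t + k))

theorem fibA_rec (k : Nat) (hk : 1 ≤ k) : fibA (k + 2) = fibA (k + 1) + fibA k := by
  match k with
  | (m+1) => simp [fibA]

theorem fibA_succ_ge (k : Nat) (hk : 1 ≤ k) : fibA k ≤ fibA (k + 1) := by
  match k with
  | 1 => simp [fibA]
  | (m+2) =>
    have := fibA_pos m
    simp only [fibA]
    omega

theorem fibA_mono (j k : Nat) (hj : 1 ≤ j) (hjk : j ≤ k) : fibA j ≤ fibA k := by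
  induction k with
  | zero => omega
  | succ k ih =>
    rcases Nat.lt_or_ge j (k+1) with h | h
    · have hk : 1 ≤ k := by omega
      exact le_trans (ih (by omega)) (fibA_succ_ge k hk)
    · have : j = k + 1 := by omega
      simp [this]

theorem cfibsFrom_succ (k m : Nat) :
    cfibsFrom k (m + 1) = fibA k :: cfibsFrom (k + 1) m := by
  unfold cfibsFrom
  rw [List.range_succ_eq_map, List.map_cons, List.map_map]
  congr 1
  · simp
  · apply List.map_congr_left
    intro t _
    simp only [Function.comp_apply]
    congr 1
    omega

theorem cfibsFrom_append (k m : Nat) :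
    cfibsFrom k (m + 1) = cfibsFrom k m ++ [fibA (m + k)] := by
  unfold cfibsFrom
  rw [List.range_succ, List.map_append]
  simp

theorem mem_cfibsFrom_pos (m : Nat) (f : Int) (hf : f ∈ cfibsFrom 2 m) : 1 ≤ f := by
  unfold cfibsFrom at hf
  simp only [List.mem_map, List.mem_range] at hf
  obtain ⟨t, _, rfl⟩ := hf
  exact fibA_pos (t + 1)

theorem loop1_spec (n : Int) : ∀ (d i : Nat), (n + 3 - i).toNat ≤ d → 1 ≤ i →
    (∀ j, 1 ≤ j → j < i → fibA j ≤ n) →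
    i ≤ loop1 n i ∧ n < fibA (loop1 n i) ∧
      (∀ j, 1 ≤ j → j < loop1 n i → fibA j ≤ n) := by
  intro d
  induction d with
  | zero =>
    intro i hd hi h
    have hgt : fibA i > n := by
      have := fibA_ge i
      omega
    rw [loop1, dif_pos hgt]
    exact ⟨le_refl _, hgt, h⟩
  | succ d ih =>
    intro i hd hi h
    rw [loop1]
    by_cases hgt : fibA i > n
    · rw [dif_pos hgt]
      exact ⟨le_refl _, hgt, h⟩
    · rw [dif_neg hgt]
      have hle : fibA i ≤ n := by omega
      have hi2 : (i : Int) ≤ n + 2 := by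
        have := fibA_ge i
        omega
      have h' : ∀ j, 1 ≤ j → j < i + 1 → fibA j ≤ n := by
        intro j h1 h2
        rcases Nat.lt_or_ge j i with hj | hj
        · exact h j h1 hj
        · have : j = i := by omega
          simp [this, hle]
      obtain ⟨a1, a2, a3⟩ := ih (i+1) (by omega) (by omega) h'
      exact ⟨by omega, a2, a3⟩

theorem a_eq (i0 : Nat) (h : 2 ≤ i0) :
    (PySem.List.pyRange 2 (i0 : Int) 1).map (fun j => fibA j.toNat) =
      cfibsFrom 2 (i0 - 2) := by
  rw [PySem.List.pyRange_one]
  unfold cfibsFrom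
  rw [List.map_map]
  have hm : ((i0 : Int) - 2).toNat = i0 - 2 := by omega
  rw [hm]
  apply List.map_congr_left
  intro t _
  simp only [Function.comp_apply]
  congr 1
  omega

theorem buildFibs_spec (n : Int) (i0 : Nat) (hi0 : 1 ≤ i0)
    (h1 : n < fibA i0) (h2 : ∀ j, 1 ≤ j → j < i0 → fibA j ≤ n) :
    ∀ (d k : Nat) (a b : Int) (pf : 1 ≤ a ∧ a < b) (acc : List Int), 2 ≤ k →
      a = fibA k → b = fibA (k+1) → i0 ≤ k + d →
        buildFibs n a b pf acc = acc ++ cfibsFrom (k+1) (i0 - 1 - k) := by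
  intro d
  induction d with
  | zero =>
    intro k a b pf acc hk ha hb hik
    subst ha hb
    have hbig : ¬ fibA (k+1) ≤ n := by
      intro hle
      have : fibA i0 ≤ fibA (k+1) := fibA_mono i0 (k+1) (by omega) (by omega)
      omega
    rw [buildFibs, dif_neg hbig]
    have : i0 - 1 - k = 0 := by omega
    simp [this, cfibsFrom]
  | succ d ih =>
    intro k a b pf acc hk ha hb hik
    rw [buildFibs]
    by_cases hle : b ≤ n
    · rw [dif_pos hle]
      subst ha hb
      have hki : k + 1 < i0 := by
        by_contra hcon
        have : fibA i0 ≤ fibA (k+1) := fibA_mono i0 (k+1) (by omega) (by omega)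
        omega
      have hsum : fibA k + fibA (k+1) = fibA (k+1+1) := by
        rw [show k+1+1 = k+2 from rfl, fibA_rec k (by omega)]
        ring
      rw [ih (k+1) (fibA (k+1)) (fibA k + fibA (k+1)) _ (acc ++ [fibA (k+1)])
        (by omega) rfl hsum (by omega)]
      have hlen : i0 - 1 - k = (i0 - 1 - (k+1)) + 1 := by omega
      rw [hlen, cfibsFrom_succ]
      simp
    · rw [dif_neg hle]
      subst ha hb
      have : i0 - 1 - k = 0 := by
        have : i0 ≤ k + 1 := by
          by_contra hcon
          exact hle (h2 (k+1) (by omega) (by omega))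
        omega
      simp [this, cfibsFrom]

-- greedy digit value of the descending fib list
def G (r : Int) : List Int → Int
  | [] => 0
  | f :: t => if f ≤ r then 10 ^ t.length + G (r - f) t else G r t

theorem gxLoop_horner : ∀ (l : List Int) (r x : Int),
    gxLoop r x l = x * 10 ^ l.length + G r l := by
  intro l
  induction l with
  | nil => simp [gxLoop, G]
  | cons f t ih =>
    intro r x
    simp only [gxLoop, G, List.length_cons]
    by_cases h : f ≤ r
    · rw [if_pos h, if_pos h, ih]
      ring
    · rw [if_neg h, if_neg h, ih]
      ring

theorem G_zero : ∀ (l : List Int), (∀ f ∈ l, 1 ≤ f) → G 0 l = 0 := by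
  intro l
  induction l with
  | nil => simp [G]
  | cons f t ih =>
    intro h
    have hf : 1 ≤ f := h f (by simp)
    simp only [G, if_neg (by omega : ¬ f ≤ (0:Int))]
    exact ih (fun g hg => h g (by simp [hg]))

theorem loop2_spec (n : Int) (m : Nat) :
    ∀ (t : Nat), t ≤ m → ∀ (s x : Int), 0 ≤ n - s → n - s < fibA (t + 2) →
      loop2 n (cfibsFrom 2 m) s x ((t : Int) + 1) =
        some (x + G (n - s) ((cfibsFrom 2 t).reverse)) := by
  intro t
  induction t with
  | zero =>
    intro _ s x h0 h1
    have hs : s = n := by simp [fibA] at h1; omega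
    rw [loop2, if_pos hs]
    simp [cfibsFrom, G]
  | succ t ih =>
    intro htm s x h0 h1
    rw [loop2]
    by_cases hs : s = n
    · rw [if_pos hs]
      have : n - s = 0 := by omega
      rw [this, G_zero _ (fun f hf => mem_cfibsFrom_pos _ f (by
        rw [List.mem_reverse] at hf; exact hf))]
      simp
    · rw [if_neg hs]
      have hidx : ((t + 1 : Nat) : Int) + 1 - 1 - 1 = ((t : Nat) : Int) := by push_cast; ring
      have hget : PySem.List.pyGet? (cfibsFrom 2 m) (((t + 1 : Nat) : Int) + 1 - 1 - 1)
          = some (fibA (t + 2)) := by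
        rw [hidx, PySem.List.pyGet?_natCast]
        unfold cfibsFrom
        rw [List.getElem?_map]
        rw [List.getElem?_range (by omega)]
        rfl
      have h1' : n - s < fibA (t + 3) := by
        rw [show t + 3 = t + 1 + 2 from rfl]
        exact h1
      have hrec : fibA (t + 3) = fibA (t + 2) + fibA (t + 1) := by
        rw [show t + 3 = t + 1 + 2 from rfl, fibA_rec (t + 1) (by omega)]
      have hmono : fibA (t + 1) ≤ fibA (t + 2) := fibA_succ_ge (t + 1) (by omega)
      have hlist : (cfibsFrom 2 (t + 1)).reverse = fibA (t + 2) :: (cfibsFrom 2 t).reverse := by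
        rw [cfibsFrom_append]
        simp
      have hlen : ((cfibsFrom 2 t).reverse).length = t := by
        simp [cfibsFrom]
      split
      · next heq =>
        rw [hget] at heq
        simp at heq
      · next v heq =>
        rw [hget] at heq
        injection heq with heq
        subst heq
        have hexp : (((t + 1 : Nat) : Int) + 1 - 1 - 1).toNat = t := by omega
        have hi' : ((t + 1 : Nat) : Int) + 1 - 1 = ((t : Nat) : Int) + 1 := by push_cast; ring
        by_cases hb : s + fibA (t + 2) ≤ n
        · rw [if_pos hb, hexp, hi']
          rw [ih (by omega) (s + fibA (t + 2)) (x + 10 ^ t) (by omega) (by omega)]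
          rw [hlist]
          simp only [G, hlen, if_pos (by omega : fibA (t + 2) ≤ n - s)]
          congr 1
          have : n - (s + fibA (t + 2)) = n - s - fibA (t + 2) := by ring
          rw [this]
          ring
        · rw [if_neg hb, hi']
          rw [ih (by omega) s x h0 (by omega)]
          rw [hlist]
          simp only [G, if_neg (by omega : ¬ fibA (t + 2) ≤ n - s)]

theorem toStr_one : PySem.Int.toStr 1 = "1" := by decide

-- ===== VERDICT (by name: the statement is the Claim_ definition above) =====
theorem dec_to_fib_spec : Claim_equal_dec_to_fib := by
  intro n _ hpre
  unfold Pre_dec_to_fib at hpre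
  unfold Spec_dec_to_fib
  rcases (by omega : n = 0 ∨ n = 1 ∨ 2 ≤ n) with h | h | h
  · subst h
    have hA : dec_to_fib 0 = PySem.Int.toStr 0 := by
      rw [dec_to_fib]
      have e1 : loop1 0 1 = 1 := by rw [loop1]; norm_num [fibA]
      simp only [e1]
      norm_num
      rw [loop2]
      norm_num
    have hB : dec_to_fib_alt 0 = PySem.Int.toStr 0 := by
      rw [dec_to_fib_alt]
      have e1 : buildFibs 0 1 2 (by omega) [1] = [1] := by
        rw [buildFibs]; norm_num
      simp only [e1]
      norm_num [gxLoop]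
    rw [hA, hB]
  · subst h
    have hB : dec_to_fib_alt 1 = PySem.Int.toStr 1 := by
      rw [dec_to_fib_alt]
      have e1 : buildFibs 1 1 2 (by omega) [1] = [1] := by
        rw [buildFibs]; norm_num
      simp only [e1]
      norm_num [gxLoop]
    rw [dec_to_fib, if_pos rfl, hB, toStr_one]
  · have hne1 : ¬ n = 1 := by omega
    obtain ⟨hge, hgt, hall⟩ := loop1_spec n ((n + 3 - 1).toNat) 1 (le_refl _) (by omega)
      (by intro j hj1 hj2; omega)
    set i0 := loop1 n 1 with hi0
    have h4 : 4 ≤ i0 := by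
      by_contra hc
      push_neg at hc
      interval_cases i0 <;> simp [fibA] at hgt <;> omega
    have hA : dec_to_fib n = PySem.Int.toStr (0 + G (n - 0) ((cfibsFrom 2 (i0 - 2)).reverse)) := by
      rw [dec_to_fib, if_neg hne1]
      simp only [← hi0]
      rw [a_eq i0 (by omega)]
      have ei : (i0 : Int) - 1 = ((i0 - 2 : Nat) : Int) + 1 := by
        omega
      rw [ei]
      rw [loop2_spec n (i0 - 2) (i0 - 2) (le_refl _) 0 0 (by omega)
        (by rw [show i0 - 2 + 2 = i0 from by omega]; omega)]
    have hB : dec_to_fib_alt n = PySem.Int.toStr (G n ((cfibsFrom 2 (i0 - 2)).reverse)) := by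
      rw [dec_to_fib_alt]
      have hb1 := buildFibs_spec n i0 (by omega) hgt hall i0 2 1 2 (by omega) [1]
        (le_refl _) (by norm_num [fibA]) (by norm_num [fibA]) (by omega)
      rw [hb1]
      have e2 : (1 : Int) :: cfibsFrom 3 (i0 - 1 - 2) = cfibsFrom 2 (i0 - 2) := by
        rw [show i0 - 2 = (i0 - 1 - 2) + 1 from by omega, cfibsFrom_succ]
        norm_num [fibA]
      simp only [List.singleton_append, e2]
      rw [gxLoop_horner]
      norm_num
    rw [hA, hB]
    norm_num
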